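-- pv_equiv track=rewrite | github.com/agam-lang/benchmarks | suites/05_ml_primitives/comparisons/softmax.py | softmax_like
-- ===== SOURCE A (Python) =====
-- def softmax_like(width: int, rounds: int) -> int:
--     total = 0
--     for r in range(rounds):
--         partial = 0
--         for l in range(width):
--             partial += ((l * 11) + r) % 251
--         total += partial
--     return total
-- ===== SOURCE B (Python) =====
-- def softmax_like(width: int, rounds: int) -> int:
--     # Period-251 structure: l -> (l*11 + r) % 251 is a bijection on each block of
--     # 251 consecutive l's (sum 31375), and the inner sum depends on r only mod 251.
--     if width <= 0 or rounds <= 0: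
--         return 0
--     FULL = 31375  # 0 + 1 + ... + 250
--     qw, mw = divmod(width, 251)
--     qr, mr = divmod(rounds, 251)
--     tail = 0
--     for r in range(mr):
--         for l in range(mw):
--             tail += (l * 11 + r) % 251
--     return rounds * qw * FULL + qr * mw * FULL + tail
-- ===== Notes on version B (the rewrite author's own statement) =====
-- stated objective: faster
-- what changed: Replaces the O(width*rounds) nested modular loop by a closed form exploiting the period-251 structure: full 251-cycles of l sum to 31375 regardless of r, and the inner sum depends on r only mod 251, so only a (width%251)x(rounds%251) remainder block is ever iterated.
import Mathlib
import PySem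

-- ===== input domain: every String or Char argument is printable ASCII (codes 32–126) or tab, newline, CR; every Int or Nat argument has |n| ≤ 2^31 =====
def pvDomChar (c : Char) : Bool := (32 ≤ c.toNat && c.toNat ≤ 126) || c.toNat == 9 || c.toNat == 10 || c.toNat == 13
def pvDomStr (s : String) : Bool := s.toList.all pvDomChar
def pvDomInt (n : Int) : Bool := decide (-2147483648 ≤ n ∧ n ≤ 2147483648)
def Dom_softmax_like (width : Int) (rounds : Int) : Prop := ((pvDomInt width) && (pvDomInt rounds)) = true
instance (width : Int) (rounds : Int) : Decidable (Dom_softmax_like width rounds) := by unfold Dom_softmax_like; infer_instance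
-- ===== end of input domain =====

-- B replaces A's width×rounds nested modular loop by a period-251 closed form:
-- only a (width%251)×(rounds%251) remainder block is iterated, the rest is arithmetic.

-- ===== PORT A =====
def softmax_like (width : Int) (rounds : Int) : Int :=
  (PySem.List.pyRange 0 rounds 1).foldl (fun total r =>
    total + (PySem.List.pyRange 0 width 1).foldl
      (fun partial_ l => partial_ + PySem.Int.mod (l * 11 + r) 251) 0) 0

-- ===== PORT B =====
def softmax_like_alt (width : Int) (rounds : Int) : Int :=
  if width ≤ 0 ∨ rounds ≤ 0 then 0
  else
    let qw := PySem.Int.floordiv width 251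
    let mw := PySem.Int.mod width 251
    let qr := PySem.Int.floordiv rounds 251
    let mr := PySem.Int.mod rounds 251
    let tail := (PySem.List.pyRange 0 mr 1).foldl (fun tail r =>
      tail + (PySem.List.pyRange 0 mw 1).foldl
        (fun tail2 l => tail2 + PySem.Int.mod (l * 11 + r) 251) 0) 0
    rounds * qw * 31375 + qr * mw * 31375 + tail

-- ===== PRECONDITION & SPEC =====
def Spec_softmax_like (width : Int) (rounds : Int) (out : Int) : Prop := out = softmax_like_alt width rounds
instance (width : Int) (rounds : Int) (out : Int) : Decidable (Spec_softmax_like width rounds out) := by unfold Spec_softmax_like; infer_instance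

-- ===== CLAIM (what is proved, stated in full; the proofs are below) =====
def Claim_equal_softmax_like : Prop := ∀ (width : Int) (rounds : Int), Dom_softmax_like width rounds → Spec_softmax_like width rounds (softmax_like width rounds)

-- ===== LEMMAS AND PROOFS =====

-- Nat-level models of the two nested sums.
def natF (w s : Nat) : Nat := ((List.range w).map (fun l => (l * 11 + s) % 251)).sum
def natG (w n : Nat) : Nat := ((List.range n).map (natF w)).sum
def natH (c : Nat) : Nat := ((List.range 251).map (fun r => (c + r) % 251)).sum

theorem sum_map_add (l : List Nat) (f g : Nat → Nat) :
    (l.map (fun x => f x + g x)).sum = (l.map f).sum + (l.map g).sum := by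
  induction l with
  | nil => simp
  | cons x xs ih => simp [ih]; ring

theorem natF_period (w s : Nat) : natF w s = natF w (s % 251) := by
  unfold natF
  congr 1
  apply List.map_congr_left
  intro l _
  omega

theorem natF_add (a b s : Nat) : natF (a + b) s = natF a s + natF b (a * 11 + s) := by
  unfold natF
  rw [List.range_add, List.map_append, List.sum_append, List.map_map]
  congr 2
  apply List.map_congr_left
  intro l _
  simp only [Function.comp_def]
  ring_nf

set_option maxRecDepth 20000 in
theorem natF_cycle_ball : ∀ s < 251, natF 251 s = 31375 := by decide

theorem natF_cycle (s : Nat) : natF 251 s = 31375 := by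
  rw [natF_period]
  exact natF_cycle_ball _ (Nat.mod_lt _ (by norm_num))

theorem natF_split (q m s : Nat) : natF (m + 251 * q) s = q * 31375 + natF m s := by
  induction q with
  | zero => simp
  | succ q ih =>
      have h : m + 251 * (q + 1) = (m + 251 * q) + 251 := by ring
      rw [h, natF_add, ih, natF_cycle]
      ring

theorem natF_div (w s : Nat) : natF w s = (w / 251) * 31375 + natF (w % 251) s := by
  have := natF_split (w / 251) (w % 251) s
  rwa [Nat.mod_add_div] at this

set_option maxRecDepth 20000 in
theorem natH_cycle_ball : ∀ c < 251, natH c = 31375 := by decide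

theorem natH_period (c : Nat) : natH c = natH (c % 251) := by
  unfold natH
  congr 1
  apply List.map_congr_left
  intro r _
  omega

theorem natH_cycle (c : Nat) : natH c = 31375 := by
  rw [natH_period]
  exact natH_cycle_ball _ (Nat.mod_lt _ (by norm_num))

theorem natF_succ (m s : Nat) : natF (m + 1) s = natF m s + (m * 11 + s) % 251 := by
  simp [natF, List.range_succ]

theorem natF_zero_left : natF 0 = fun _ => 0 := by
  funext s; simp [natF]

theorem natG_zero_left (n : Nat) : natG 0 n = 0 := by
  simp [natG, natF_zero_left]

theorem natG_cycle (m : Nat) : natG m 251 = m * 31375 := by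
  induction m with
  | zero => exact natG_zero_left 251
  | succ m ih =>
      unfold natG
      rw [List.map_congr_left (fun r _ => natF_succ m r), sum_map_add]
      have hH : ((List.range 251).map (fun r => (m * 11 + r) % 251)).sum = natH (m * 11) := rfl
      have hg : ((List.range 251).map (natF m)).sum = natG m 251 := rfl
      rw [hH, natH_cycle, hg, ih]
      ring

theorem natF_period_add (m x : Nat) : natF m (x + 251) = natF m x := by
  rw [natF_period m (x + 251), natF_period m x]
  congr 1
  omega

theorem natG_consec (m x : Nat) :
    ((List.range 251).map (fun j => natF m (x + j))).sum = natG m 251 := by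
  induction x with
  | zero => simp [natG]
  | succ x ih =>
      have h252 : ((List.range 252).map (fun j => natF m (x + j))).sum
          = ((List.range 251).map (fun j => natF m (x + j))).sum + natF m (x + 251) := by
        rw [show (252 : Nat) = 251 + 1 by norm_num, List.range_succ]
        simp
      have h252' : ((List.range 252).map (fun j => natF m (x + j))).sum
          = natF m x + ((List.range 251).map (fun j => natF m (x + 1 + j))).sum := by
        rw [show (252 : Nat) = 251 + 1 by norm_num, List.range_succ_eq_map]
        simp only [List.map_cons, List.sum_cons, List.map_map, Nat.add_zero]
        refine congrArg₂ (· + ·) rfl ?_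
        refine congrArg List.sum (List.map_congr_left ?_)
        intro j _
        simp only [Function.comp_def]
        exact congrArg (natF m) (by omega)
      have hkey := h252.symm.trans h252'
      rw [natF_period_add] at hkey
      omega

theorem natG_append (m x c : Nat) :
    natG m (x + c) = natG m x + ((List.range c).map (fun j => natF m (x + j))).sum := by
  unfold natG
  rw [List.range_add, List.map_append, List.sum_append, List.map_map]
  rfl

theorem natG_add (m k q : Nat) : natG m (k + 251 * q) = q * natG m 251 + natG m k := by
  induction q with
  | zero => simp
  | succ q ih =>
      have h : k + 251 * (q + 1) = (k + 251 * q) + 251 := by ring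
      rw [h, natG_append, natG_consec, ih]
      ring

theorem natG_div (m n : Nat) : natG m n = (n / 251) * natG m 251 + natG m (n % 251) := by
  have := natG_add m (n % 251) (n / 251)
  rwa [Nat.mod_add_div] at this

theorem natG_closed (w n : Nat) :
    natG w n = n * (w / 251) * 31375 + (n / 251) * ((w % 251) * 31375)
      + natG (w % 251) (n % 251) := by
  have h1 : natG w n = n * ((w / 251) * 31375) + natG (w % 251) n := by
    unfold natG
    rw [List.map_congr_left (fun r _ => natF_div w r), sum_map_add]
    congr 1
    simp [List.sum_replicate, smul_eq_mul]
  rw [h1, natG_div (w % 251) n, natG_cycle]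
  ring

-- Bridge: the Int nested folds of the ports equal the Nat model.
theorem fold_bridge (W : Int) (g : Int → Int) (init : Int) :
    (PySem.List.pyRange 0 W 1).foldl (fun p l => p + g l) init
      = init + ((List.range W.toNat).map (fun k : Nat => g (k : Int))).sum := by
  rw [PySem.List.foldl_add, PySem.List.pyRange_one, List.map_map]
  simp only [Int.sub_zero, Function.comp_def, zero_add]

theorem bridge_inner (W : Int) (r : Nat) :
    (PySem.List.pyRange 0 W 1).foldl
        (fun p l => p + PySem.Int.mod (l * 11 + (r : Int)) 251) 0
      = ((natF W.toNat r : Nat) : Int) := by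
  rw [fold_bridge W (fun l => PySem.Int.mod (l * 11 + (r : Int)) 251) 0, zero_add]
  unfold natF
  rw [Nat.cast_list_sum, List.map_map]
  congr 1
  apply List.map_congr_left
  intro k _
  show PySem.Int.mod ((k : Int) * 11 + (r : Int)) 251 = (((k * 11 + r) % 251 : Nat) : Int)
  rw [PySem.Int.mod_eq_emod_of_pos (by norm_num)]
  push_cast
  rfl

theorem bridge_outer (W R : Int) :
    (PySem.List.pyRange 0 R 1).foldl (fun total r =>
        total + (PySem.List.pyRange 0 W 1).foldl
          (fun p l => p + PySem.Int.mod (l * 11 + r) 251) 0) 0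
      = ((natG W.toNat R.toNat : Nat) : Int) := by
  rw [fold_bridge R (fun r => (PySem.List.pyRange 0 W 1).foldl
        (fun p l => p + PySem.Int.mod (l * 11 + r) 251) 0) 0, zero_add]
  unfold natG
  rw [Nat.cast_list_sum, List.map_map]
  congr 1
  apply List.map_congr_left
  intro r' _
  exact bridge_inner W r'

-- ===== VERDICT (by name: the statement is the Claim_ definition above) =====
theorem softmax_like_spec : Claim_equal_softmax_like := by
  intro width rounds _
  unfold Spec_softmax_like
  have hA : softmax_like width rounds = ((natG width.toNat rounds.toNat : Nat) : Int) := by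
    unfold softmax_like
    rw [bridge_outer]
  by_cases hcase : width ≤ 0 ∨ rounds ≤ 0
  · have hB : softmax_like_alt width rounds = 0 := by
      unfold softmax_like_alt
      rw [if_pos hcase]
    rw [hA, hB]
    rcases hcase with h | h
    · rw [Int.toNat_of_nonpos h, natG_zero_left]
      rfl
    · rw [Int.toNat_of_nonpos h]
      rfl
  · have hw : 0 < width := by omega
    have hn : 0 < rounds := by omega
    have hw' : width = ((width.toNat : Nat) : Int) := (Int.toNat_of_nonneg hw.le).symm
    have hn' : rounds = ((rounds.toNat : Nat) : Int) := (Int.toNat_of_nonneg hn.le).symm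
    set w := width.toNat with hwdef
    set n := rounds.toNat with hndef
    have hfdw : PySem.Int.floordiv width 251 = ((w / 251 : Nat) : Int) := by
      rw [hw']; exact_mod_cast PySem.Int.floordiv_natCast w 251
    have hmdw : PySem.Int.mod width 251 = ((w % 251 : Nat) : Int) := by
      rw [hw']; exact_mod_cast PySem.Int.mod_natCast w 251
    have hfdn : PySem.Int.floordiv rounds 251 = ((n / 251 : Nat) : Int) := by
      rw [hn']; exact_mod_cast PySem.Int.floordiv_natCast n 251
    have hmdn : PySem.Int.mod rounds 251 = ((n % 251 : Nat) : Int) := by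
      rw [hn']; exact_mod_cast PySem.Int.mod_natCast n 251
    have hB : softmax_like_alt width rounds
        = rounds * ((w / 251 : Nat) : Int) * 31375
          + ((n / 251 : Nat) : Int) * ((w % 251 : Nat) : Int) * 31375
          + ((natG (w % 251) (n % 251) : Nat) : Int) := by
      unfold softmax_like_alt
      rw [if_neg hcase]
      simp only [hfdw, hmdw, hfdn, hmdn]
      rw [bridge_outer, Int.toNat_natCast, Int.toNat_natCast]
    rw [hA, hB, natG_closed w n, hn']
    push_cast
    ring
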